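-- pv_equiv track=rewrite | github.com/CaMMelo/scheduler | core/scheduler.py | f_objective
-- ===== SOURCE A (Python) =====
-- def f_objective(solution, context, projects):
--
--     # IDEA: adjust the benefit and penality with machine-learning algorithms
--
--     objective = 0
--
--     for i in range(1, len(solution)):
--
--         if solution[i] != solution[i-1]:
--             objective += 2
--         else:
--             objective -= 1
--
--     return objective
-- ===== SOURCE B (Python) =====
-- def f_objective(solution, context, projects):
--     # Collapse consecutive duplicates into a run-representative list; the
--     # objective is determined by the number of runs r and the length n:
--     # each run boundary (r - 1 of them) scores +2, the remaining of the
--     # n - 1 adjacent pairs score -1, giving 3*r - n - 2 for non-empty input.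
--     compressed = []
--     for x in solution:
--         if not compressed or compressed[-1] != x:
--             compressed.append(x)
--     if not compressed:
--         return 0
--     return 3 * len(compressed) - len(solution) - 2
-- ===== Notes on version B (the rewrite author's own statement) =====
-- stated objective: alternative
-- what changed: Instead of scoring each adjacent index pair +2/-1 in a loop, B builds a run-length-compressed copy of the list (consecutive duplicates collapsed, comparing against the compressed list's own last element) and computes the objective in closed form from the run count: 3*runs - len - 2.
import Mathlib
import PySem

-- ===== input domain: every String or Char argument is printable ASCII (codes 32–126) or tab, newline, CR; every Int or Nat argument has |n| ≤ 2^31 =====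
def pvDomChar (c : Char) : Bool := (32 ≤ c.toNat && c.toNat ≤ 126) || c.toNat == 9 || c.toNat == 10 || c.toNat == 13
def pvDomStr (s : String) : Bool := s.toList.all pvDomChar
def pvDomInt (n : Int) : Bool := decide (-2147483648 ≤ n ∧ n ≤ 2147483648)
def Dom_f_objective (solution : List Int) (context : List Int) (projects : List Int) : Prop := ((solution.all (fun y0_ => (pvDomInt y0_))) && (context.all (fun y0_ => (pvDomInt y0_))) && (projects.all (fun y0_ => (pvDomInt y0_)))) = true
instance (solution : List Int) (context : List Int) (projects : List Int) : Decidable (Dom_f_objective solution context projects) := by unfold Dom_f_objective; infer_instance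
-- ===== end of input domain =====

-- B replaces A's per-index +2/-1 scoring loop by run-length compression of the
-- list (consecutive duplicates collapsed) and the closed form 3*runs - len - 2.

-- ===== PORT A =====
-- for i in range(1, len(solution)): compare solution[i] with solution[i-1]
-- (indices are always in range, so pyGetD with default 0 is exact here)
def f_objective (solution : List Int) (context : List Int) (projects : List Int) : Int :=
  (PySem.List.pyRange 1 solution.length 1).foldl
    (fun objective i =>
      if PySem.List.pyGetD solution i 0 ≠ PySem.List.pyGetD solution (i - 1) 0 then
        objective + 2
      else
        objective - 1) 0

-- ===== PORT B =====
-- compressed[-1] on a non-empty list is its last element (List.getLast?)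
def f_objective_alt (solution : List Int) (context : List Int) (projects : List Int) : Int :=
  let compressed : List Int :=
    solution.foldl
      (fun compressed x =>
        if compressed = [] ∨ compressed.getLast? ≠ some x then compressed ++ [x]
        else compressed) []
  if compressed = [] then 0
  else 3 * (compressed.length : Int) - (solution.length : Int) - 2

-- ===== PRECONDITION & SPEC =====
def Spec_f_objective (solution : List Int) (context : List Int) (projects : List Int) (out : Int) : Prop := out = f_objective_alt solution context projects
instance (solution : List Int) (context : List Int) (projects : List Int) (out : Int) : Decidable (Spec_f_objective solution context projects out) := by unfold Spec_f_objective; infer_instance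

-- ===== CLAIM (what is proved, stated in full; the proofs are below) =====
def Claim_equal_f_objective : Prop := ∀ (solution : List Int) (context : List Int) (projects : List Int), Dom_f_objective solution context projects → Spec_f_objective solution context projects (f_objective solution context projects)

-- ===== LEMMAS AND PROOFS =====

-- number of adjacent transitions in a list (proof-only characterisation)
def pvTrans : List Int → Nat
  | x :: y :: r => (if x ≠ y then 1 else 0) + pvTrans (y :: r)
  | _ => 0

theorem pv_getD_shift (x : Int) (t : List Int) (i : Int) (h : 0 ≤ i) :
    PySem.List.pyGetD (x :: t) (i + 1) 0 = PySem.List.pyGetD t i 0 := by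
  obtain ⟨k, rfl⟩ := Int.eq_ofNat_of_zero_le h
  have h1 : ((k : Int) + 1) = ((k + 1 : Nat) : Int) := by push_cast; ring
  rw [h1, PySem.List.pyGetD_natCast, PySem.List.pyGetD_natCast]
  simp

-- A's loop, rebased to fold over List.range with index 1+k, from an arbitrary accumulator
theorem pv_loop_eq (t : List Int) : ∀ (x A0 : Int),
    (List.range t.length).foldl
      (fun (objective : Int) (k : Nat) =>
        if PySem.List.pyGetD (x :: t) ((1 : Int) + (k : Int)) 0 ≠
            PySem.List.pyGetD (x :: t) (((1 : Int) + (k : Int)) - 1) 0 then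
          objective + 2
        else
          objective - 1) A0
    = A0 + 3 * (pvTrans (x :: t) : Int) - t.length := by
  induction t with
  | nil => intro x A0; simp [pvTrans]
  | cons y r ih =>
    intro x A0
    simp only [List.length_cons]
    rw [List.range_succ_eq_map, List.foldl_cons, List.foldl_map]
    have h0 : PySem.List.pyGetD (x :: y :: r) ((1:Int) + (0:Nat)) 0 = y := by
      simp [PySem.List.pyGetD]
    have h0' : PySem.List.pyGetD (x :: y :: r) (((1:Int) + (0:Nat)) - 1) 0 = x := by
      simp [PySem.List.pyGetD]
    have hbody :
        (fun (objective : Int) (k : Nat) =>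
          if PySem.List.pyGetD (x :: y :: r) ((1 : Int) + (k + 1 : Nat)) 0 ≠
              PySem.List.pyGetD (x :: y :: r) (((1 : Int) + (k + 1 : Nat)) - 1) 0 then
            objective + 2
          else objective - 1)
        = (fun (objective : Int) (k : Nat) =>
          if PySem.List.pyGetD (y :: r) ((1 : Int) + k) 0 ≠
              PySem.List.pyGetD (y :: r) (((1 : Int) + k) - 1) 0 then
            objective + 2
          else objective - 1) := by
      funext objective k
      have e1 : PySem.List.pyGetD (x :: y :: r) ((1 : Int) + ((k + 1 : Nat) : Int)) 0
          = PySem.List.pyGetD (y :: r) ((1 : Int) + (k : Int)) 0 := by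
        have a1 : ((1 : Int) + ((k + 1 : Nat) : Int)) = ((k : Int) + 1) + 1 := by push_cast; ring
        have a2 : ((1 : Int) + (k : Int)) = (k : Int) + 1 := by ring
        rw [a1, a2]
        exact pv_getD_shift x (y :: r) ((k : Int) + 1) (by positivity)
      have e2 : PySem.List.pyGetD (x :: y :: r) (((1 : Int) + ((k + 1 : Nat) : Int)) - 1) 0
          = PySem.List.pyGetD (y :: r) (((1 : Int) + (k : Int)) - 1) 0 := by
        have a1 : (((1 : Int) + ((k + 1 : Nat) : Int)) - 1) = (k : Int) + 1 := by push_cast; ring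
        have a2 : (((1 : Int) + (k : Int)) - 1) = (k : Int) := by ring
        rw [a1, a2]
        exact pv_getD_shift x (y :: r) (k : Int) (by positivity)
      rw [e1, e2]
    rw [h0, h0', hbody, ih]
    by_cases hxy : y ≠ x
    · have hxy' : x ≠ y := fun h => hxy h.symm
      simp only [if_pos hxy, pvTrans, if_pos hxy']
      push_cast; ring
    · have hxy' : ¬ x ≠ y := by simpa [eq_comm] using hxy
      simp only [if_neg hxy, pvTrans, if_neg hxy']
      push_cast; ring

-- B's compression loop: from a non-empty accumulator with last element l,
-- the final length is the accumulator length plus the transitions of l :: t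
theorem pv_compress_len (t : List Int) : ∀ (l : Int) (acc : List Int),
    acc.getLast? = some l →
    (t.foldl
      (fun compressed x =>
        if compressed = [] ∨ compressed.getLast? ≠ some x then compressed ++ [x]
        else compressed) acc).length = acc.length + pvTrans (l :: t) := by
  induction t with
  | nil => intro l acc _; simp [pvTrans]
  | cons y r ih =>
    intro l acc hlast
    have hne : acc ≠ [] := by intro h; rw [h] at hlast; simp at hlast
    simp only [List.foldl_cons]
    by_cases hly : l = y
    · have hcond : ¬ (acc = [] ∨ acc.getLast? ≠ some y) := by
        refine not_or.mpr ⟨hne, not_not.mpr ?_⟩; rw [hlast, hly] -- was push_neg; exact ⟨hne, by rw [hlast, hly]⟩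
      rw [if_neg hcond, ih y acc (by rw [hlast, hly])]
      simp [pvTrans, hly]
    · have hcond : acc = [] ∨ acc.getLast? ≠ some y := by
        right; rw [hlast]; simpa using hly
      rw [if_pos hcond, ih y (acc ++ [y]) (by simp)]
      have : (l ≠ y) := hly
      simp [pvTrans, this]
      omega

-- ===== VERDICT (by name: the statement is the Claim_ definition above) =====
theorem f_objective_spec : Claim_equal_f_objective := by
  intro solution context projects _
  unfold Spec_f_objective f_objective f_objective_alt
  cases solution with
  | nil => simp [PySem.List.pyRange]
  | cons x t =>
    have hlen : ((x :: t).length : Int) = (t.length : Int) + 1 := by simp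
    rw [hlen, PySem.List.pyRange_one, List.foldl_map]
    have h1 : (((t.length : Int) + 1) - 1).toNat = t.length := by omega
    rw [h1, pv_loop_eq t x 0]
    -- B side
    rw [List.foldl_cons]
    have hstart : (if ([] : List Int) = [] ∨ ([] : List Int).getLast? ≠ some x
        then ([] : List Int) ++ [x] else []) = [x] := by simp
    rw [hstart]
    have hlen2 := pv_compress_len t x [x] (by simp)
    set c := t.foldl
      (fun compressed x =>
        if compressed = [] ∨ compressed.getLast? ≠ some x then compressed ++ [x]
        else compressed) [x] with hc
    have hne : c ≠ [] := by
      intro h; rw [h] at hlen2; simp at hlen2; omega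
    rw [if_neg hne, hlen2]
    simp only [List.length_cons, List.length_nil]
    push_cast; ring
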